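-- pv_equiv track=rewrite | github.com/RazerM/advent-of-code-2020 | aoc/day10.py | part1
-- ===== SOURCE A (Python) =====
-- from collections import Counter
--
-- def find_candidates(adapters, joltage):
--     return adapters.intersection(joltage + i for i in range(1, 4))
--
-- def part1(adapters):
--     builtin_adapter = max(adapters) + 3
--     adapters.add(builtin_adapter)
--
--     current_joltage = 0
--
--     differences = []
--     counter = Counter()
--
--     while candidates := find_candidates(adapters, current_joltage):
--         next_joltage = min(candidates)
--         adapters.remove(next_joltage)
--         differences.append(next_joltage - current_joltage)
--         counter[next_joltage - current_joltage] += 1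
--         current_joltage = next_joltage
--
--     return counter[1] * counter[3]
-- ===== SOURCE B (Python) =====
-- def part1(adapters):
--     adapters.add(max(adapters) + 3)
--     ones = threes = 0
--     prev = 0
--     for x in sorted(adapters):
--         if x <= 0:
--             continue
--         d = x - prev
--         if d > 3:
--             break
--         if d == 1:
--             ones += 1
--         elif d == 3:
--             threes += 1
--         prev = x
--     return ones * threes
-- ===== Notes on version B (the rewrite author's own statement) =====
-- stated objective: idiomatic
-- what changed: Replaced the per-step set-intersection/min/remove greedy while-loop and Counter with one sort of the adapter set followed by a single linear difference scan that breaks at the first gap larger than 3.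
import Mathlib
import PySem

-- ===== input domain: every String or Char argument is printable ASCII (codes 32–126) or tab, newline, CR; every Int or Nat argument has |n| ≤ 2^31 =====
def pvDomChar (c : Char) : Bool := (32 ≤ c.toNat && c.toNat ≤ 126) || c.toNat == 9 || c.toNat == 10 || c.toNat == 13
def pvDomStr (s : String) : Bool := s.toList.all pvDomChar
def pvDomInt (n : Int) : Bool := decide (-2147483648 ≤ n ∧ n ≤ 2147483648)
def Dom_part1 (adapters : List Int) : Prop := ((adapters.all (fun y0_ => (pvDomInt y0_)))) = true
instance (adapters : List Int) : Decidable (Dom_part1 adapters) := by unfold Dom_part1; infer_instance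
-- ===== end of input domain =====

-- B replaces A's set-intersection/min/remove greedy loop by sort + one diff scan (return value only:
-- Python A consumes its argument set while B only adds the builtin adapter to it).

-- ===== PORT A =====
-- find_candidates(adapters, joltage) = adapters ∩ {joltage+1, joltage+2, joltage+3}
def findCandidates (s : PySem.Set Int) (j : Int) : List Int :=
  PySem.Set.inter s [j + 1, j + 2, j + 3]

-- termination of the while-loop: removing a member shrinks the set
theorem discard_length_lt (s : List Int) (x : Int) (h : x ∈ s) :
    (PySem.Set.discard s x).length < s.length := by
  have hd : PySem.Set.discard s x = s.filter (fun y => !(y == x)) := by simp [PySem.Set.discard]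
  rw [hd, List.length_filter_lt_length_iff_exists]
  exact ⟨x, h, by simp⟩

-- the while-loop: remove the minimal candidate, record the difference, repeat
def part1Loop (s : PySem.Set Int) (cur : Int) (diffs : List Int)
    (counter : PySem.Dict Int Int) : Int :=
  match h : PySem.List.min? (findCandidates s cur) (fun x => x) with
  | none => counter.getD 1 0 * counter.getD 3 0
  | some m =>
    part1Loop ((PySem.Set.remove? s m).getD s) m (diffs ++ [m - cur])
      (counter.modify (m - cur) 0 (· + 1))
termination_by s.length
decreasing_by
  have hm : m ∈ findCandidates s cur := PySem.List.min?_mem h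
  have hms : m ∈ s := ((PySem.Set.mem_inter _ _ _).mp hm).1
  rw [PySem.Set.remove?_of_mem hms]
  simpa using discard_length_lt s m hms

def part1 (adapters : List Int) : Int :=
  match PySem.List.max? (PySem.Set.ofList adapters) (fun x => x) with
  | none => 0  -- max(adapters) raises ValueError on an empty set; excluded by Pre_part1
  | some mx =>
    part1Loop (PySem.Set.add (PySem.Set.ofList adapters) (mx + 3)) 0 [] PySem.Dict.empty

-- ===== PORT B =====
-- scan the sorted adapters: skip non-positive, break at a gap > 3, count 1- and 3-gaps
def scanAlt : List Int → Int → Int → Int → Int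
  | [], _, ones, threes => ones * threes
  | x :: rest, prev, ones, threes =>
    if x ≤ 0 then scanAlt rest prev ones threes
    else if x - prev > 3 then ones * threes
    else scanAlt rest x (if x - prev = 1 then ones + 1 else ones)
                        (if x - prev = 3 then threes + 1 else threes)

def part1_alt (adapters : List Int) : Int :=
  match PySem.List.max? (PySem.Set.ofList adapters) (fun x => x) with
  | none => 0  -- max(adapters) raises ValueError on an empty set; excluded by Pre_part1
  | some mx =>
    scanAlt (PySem.List.sorted (PySem.Set.add (PySem.Set.ofList adapters) (mx + 3)) (fun x => x) false) 0 0 0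

-- ===== PRECONDITION & SPEC =====
-- Pre_ excludes only the empty list, on which Python A raises ValueError (max of an empty set).
def Pre_part1 (adapters : List Int) : Prop := adapters ≠ []
instance (adapters : List Int) : Decidable (Pre_part1 adapters) := by unfold Pre_part1; infer_instance
def pvWitness_part1 : List Int := [1, 4, 5, 6]

def Spec_part1 (adapters : List Int) (out : Int) : Prop := out = part1_alt adapters
instance (adapters : List Int) (out : Int) : Decidable (Spec_part1 adapters out) := by unfold Spec_part1; infer_instance

-- ===== CLAIM (what is proved, stated in full; the proofs are below) =====
def Claim_equal_part1 : Prop := ∀ (adapters : List Int), Dom_part1 adapters → Pre_part1 adapters → Spec_part1 adapters (part1 adapters)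

-- ===== LEMMAS AND PROOFS =====

-- membership in the candidate set
theorem mem_findCandidates (s : PySem.Set Int) (cur y : Int) :
    y ∈ findCandidates s cur ↔ y ∈ s ∧ (y = cur + 1 ∨ y = cur + 2 ∨ y = cur + 3) := by
  unfold findCandidates
  rw [PySem.Set.mem_inter]
  simp

-- the candidate set is empty when nothing of s lies in (cur, cur+3]
theorem findCandidates_eq_nil (s : PySem.Set Int) (cur : Int)
    (h : ∀ y, y ∈ s → ¬(cur < y ∧ y ≤ cur + 3)) : findCandidates s cur = [] := by
  rw [List.eq_nil_iff_forall_not_mem]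
  intro y hy
  rw [mem_findCandidates] at hy
  exact h y hy.1 (by omega)

-- A's loop equals B's scan, given the strictly sorted list of the remaining elements above cur
theorem key_lemma : ∀ (l : List Int) (s : PySem.Set Int) (cur : Int) (diffs : List Int)
    (counter : PySem.Dict Int Int) (ones threes : Int),
    l.Pairwise (· < ·) → 0 ≤ cur →
    (∀ y, y ∈ l ↔ y ∈ s ∧ cur < y) →
    counter.getD 1 0 = ones → counter.getD 3 0 = threes →
    part1Loop s cur diffs counter = scanAlt l cur ones threes := by
  intro l
  induction l with
  | nil =>
    intro s cur diffs counter ones threes _ _ hmem h1 h3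
    have hc : findCandidates s cur = [] := by
      apply findCandidates_eq_nil
      intro y hy hcy
      exact (List.not_mem_nil).elim (((hmem y).mpr ⟨hy, hcy.1⟩))
    rw [part1Loop]
    split
    · rw [scanAlt, h1, h3]
    · rename_i m hm
      rw [hc] at hm
      simp [PySem.List.min?] at hm
  | cons x rest ih =>
    intro s cur diffs counter ones threes hsort hcur hmem h1 h3
    have hxl : x ∈ s ∧ cur < x := (hmem x).mp List.mem_cons_self
    by_cases hx3 : cur + 3 < x
    · -- gap > 3: candidates empty, loop stops; scan breaks
      have hc : findCandidates s cur = [] := by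
        apply findCandidates_eq_nil
        intro y hy hcy
        have hyl := (hmem y).mpr ⟨hy, hcy.1⟩
        rcases List.mem_cons.mp hyl with rfl | hyr
        · omega
        · have := (List.pairwise_cons.mp hsort).1 y hyr
          omega
      rw [part1Loop]
      split
      · rw [scanAlt, h1, h3]
        have hle : ¬ x ≤ 0 := by omega
        have hgt : x - cur > 3 := by omega
        simp [hle, hgt]
      · rename_i m hm
        rw [hc] at hm
        simp [PySem.List.min?] at hm
    · -- next adapter x is within reach: A removes exactly x
      have hxc : x ∈ findCandidates s cur := by
        rw [mem_findCandidates]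
        exact ⟨hxl.1, by omega⟩
      have hmin : PySem.List.min? (findCandidates s cur) (fun x => x) = some x := by
        rcases hmn : PySem.List.min? (findCandidates s cur) (fun x => x) with _ | m
        · rw [PySem.List.min?_eq_none_iff] at hmn
          rw [hmn] at hxc
          exact absurd hxc List.not_mem_nil
        · have hmc := PySem.List.min?_mem hmn
          have hmx : m ≤ x := PySem.List.min?_isMin hmn x hxc
          have hxm : x ≤ m := by
            have hms := (mem_findCandidates s cur m).mp hmc
            have hml := (hmem m).mpr ⟨hms.1, by omega⟩
            rcases List.mem_cons.mp hml with rfl | hmr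
            · exact le_refl _
            · exact le_of_lt ((List.pairwise_cons.mp hsort).1 m hmr)
          rw [le_antisymm hmx hxm]
      rw [part1Loop]
      split
      · rename_i hnone
        rw [hmin] at hnone
        exact absurd hnone (by simp)
      · rename_i m hm
        rw [hmin] at hm
        injection hm with hm
        subst hm
        rw [PySem.Set.remove?_of_mem hxl.1, Option.getD_some]
        -- reduce the scan one step
        have hle : ¬ x ≤ 0 := by omega
        have hgt : ¬ x - cur > 3 := by omega
        rw [scanAlt]
        simp only [hle, hgt, if_false]
        apply ih
        · exact (List.pairwise_cons.mp hsort).2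
        · omega
        · intro y
          rw [PySem.Set.mem_discard]
          constructor
          · intro hyr
            have hy := (hmem y).mp (List.mem_cons_of_mem x hyr)
            have hxy := (List.pairwise_cons.mp hsort).1 y hyr
            exact ⟨⟨hy.1, by omega⟩, hxy⟩
          · rintro ⟨⟨hys, hne⟩, hxy⟩
            have := (hmem y).mpr ⟨hys, by omega⟩
            rcases List.mem_cons.mp this with rfl | hyr
            · omega
            · exact hyr
        · rw [PySem.Dict.getD_modify]
          by_cases he : x - cur = 1
          · rw [if_pos he.symm, if_pos he, he, h1]
          · rw [if_neg (fun hh => he hh.symm), if_neg he, h1]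
        · rw [PySem.Dict.getD_modify]
          by_cases he : x - cur = 3
          · rw [if_pos he.symm, if_pos he, he, h3]
          · rw [if_neg (fun hh => he hh.symm), if_neg he, h3]

-- a strictly positive scan ignores a non-positive prefix when prev = 0
theorem scanAlt_skip : ∀ (pre l : List Int) (ones threes : Int),
    (∀ y ∈ pre, y ≤ 0) → scanAlt (pre ++ l) 0 ones threes = scanAlt l 0 ones threes := by
  intro pre
  induction pre with
  | nil => intro l ones threes _; rfl
  | cons y ys ih =>
    intro l ones threes h
    rw [List.cons_append, scanAlt, if_pos (h y List.mem_cons_self)]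
    exact ih l ones threes (fun z hz => h z (List.mem_cons_of_mem y hz))

-- a (≤)-sorted list is its non-positive part followed by its positive part
theorem sorted_split (L : List Int) (h : L.Pairwise (· ≤ ·)) :
    L = L.filter (fun y => decide (y ≤ 0)) ++ L.filter (fun y => decide (0 < y)) := by
  induction L with
  | nil => rfl
  | cons x xs ih =>
    rcases List.pairwise_cons.mp h with ⟨hx, hxs⟩
    simp only [List.filter_cons, decide_eq_true_eq]
    by_cases hx0 : x ≤ 0
    · rw [if_pos hx0, if_neg (not_lt.mpr hx0), List.cons_append]
      exact congrArg (x :: ·) (ih hxs)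
    · have hpos : 0 < x := by omega
      have hnil : xs.filter (fun y => decide (y ≤ 0)) = [] := by
        rw [List.filter_eq_nil_iff]
        intro y hy
        have := hx y hy
        simp only [decide_eq_true_eq]
        omega
      have hall : xs.filter (fun y => decide (0 < y)) = xs := by
        rw [List.filter_eq_self]
        intro y hy
        have := hx y hy
        simp only [decide_eq_true_eq]
        omega
      rw [if_neg hx0, if_pos hpos, hnil, hall, List.nil_append]

-- ===== VERDICT (by name: the statement is the Claim_ definition above) =====
theorem part1_spec : Claim_equal_part1 := by
  intro adapters _ _
  unfold Spec_part1
  rcases hmx : PySem.List.max? (PySem.Set.ofList adapters) (fun x => x) with _ | mx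
  · simp only [part1, part1_alt, hmx]
  · simp only [part1, part1_alt, hmx]
    set s0 : PySem.Set Int := PySem.Set.add (PySem.Set.ofList adapters) (mx + 3) with hs0
    have hnd : s0.Nodup := PySem.Set.nodup_add _ _ (PySem.Set.nodup_ofList _)
    set L : List Int := PySem.List.sorted s0 (fun x => x) false with hL
    have hperm : L.Perm s0 := PySem.List.sorted_perm _ _ _
    have hstrict : L.Pairwise (· < ·) := by
      have := PySem.Set.ofList_eq_self_of_nodup _ hnd
      have h2 := PySem.List.sorted_ofList_pairwise_lt (xs := s0)
      rwa [this] at h2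
    have hwk : L.Pairwise (· ≤ ·) := hstrict.imp le_of_lt
    rw [show scanAlt L 0 0 0 = scanAlt (L.filter (fun y => decide (0 < y))) 0 0 0 by
      conv_lhs => rw [sorted_split L hwk]
      exact scanAlt_skip _ _ 0 0 (fun y hy => by
        have := List.of_mem_filter hy; simpa using this)]
    apply key_lemma
    · exact hstrict.filter _
    · exact le_refl 0
    · intro y
      rw [List.mem_filter, hperm.mem_iff]
      simp
    · rfl
    · rfl
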